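-- pv_equiv track=rewrite | github.com/Michael-YuZong/AI-Fiance | src/commands/briefing.py | _technical_bias_label
-- ===== SOURCE A (Python) =====
-- from typing import Any, Dict, List, Mapping, Optional, Sequence
--
-- def _technical_bias_label(technical: Dict[str, Any]) -> str:
--     bull = 0
--     bear = 0
--     for key in ("ma_system", "macd", "kdj", "obv"):
--         signal = str(technical.get(key, {}).get("signal", ""))
--         if signal == "bullish":
--             bull += 1
--         elif signal == "bearish":
--             bear += 1
--
--     dmi_signal = str(technical.get("dmi", {}).get("signal", ""))
--     if dmi_signal == "bullish_trend":
--         bull += 1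
--     elif dmi_signal == "bearish_trend":
--         bear += 1
--
--     rsi_signal = str(technical.get("rsi", {}).get("signal", ""))
--     if rsi_signal == "oversold":
--         bull += 1
--     elif rsi_signal == "overbought":
--         bear += 1
--
--     if bull - bear >= 2:
--         return "偏强"
--     if bear - bull >= 2:
--         return "偏弱"
--     return "分歧"
-- ===== SOURCE B (Python) =====
-- from typing import Any, Dict
--
-- _BULL_PAIRS = frozenset({
--     ("ma_system", "bullish"), ("macd", "bullish"), ("kdj", "bullish"),
--     ("obv", "bullish"), ("dmi", "bullish_trend"), ("rsi", "oversold"),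
-- })
-- _BEAR_PAIRS = frozenset({
--     ("ma_system", "bearish"), ("macd", "bearish"), ("kdj", "bearish"),
--     ("obv", "bearish"), ("dmi", "bearish_trend"), ("rsi", "overbought"),
-- })
--
-- def _technical_bias_label(technical: Dict[str, Any]) -> str:
--     pairs = [(key, str(info.get("signal", ""))) for key, info in technical.items()]
--     bull = sum(p in _BULL_PAIRS for p in pairs)
--     bear = sum(p in _BEAR_PAIRS for p in pairs)
--     diff = bull - bear
--     if diff >= 2:
--         return "偏强"
--     if diff <= -2:
--         return "偏弱"
--     return "分歧"
-- ===== Notes on version B (the rewrite author's own statement) =====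
-- stated objective: alternative
-- what changed: Instead of probing six hardcoded keys with per-key if/elif branches and two counters, B makes one pass over the input dict's items, classifying each (key, signal) pair by membership in two frozensets of bullish/bearish pairs and counting with sum(); Pre_ excludes association lists with duplicate top-level keys, which cannot arise from a Python dict (the Lean dict encoding allows them, and there A's first-match lookup and B's full item scan could disagree).
import Mathlib
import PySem

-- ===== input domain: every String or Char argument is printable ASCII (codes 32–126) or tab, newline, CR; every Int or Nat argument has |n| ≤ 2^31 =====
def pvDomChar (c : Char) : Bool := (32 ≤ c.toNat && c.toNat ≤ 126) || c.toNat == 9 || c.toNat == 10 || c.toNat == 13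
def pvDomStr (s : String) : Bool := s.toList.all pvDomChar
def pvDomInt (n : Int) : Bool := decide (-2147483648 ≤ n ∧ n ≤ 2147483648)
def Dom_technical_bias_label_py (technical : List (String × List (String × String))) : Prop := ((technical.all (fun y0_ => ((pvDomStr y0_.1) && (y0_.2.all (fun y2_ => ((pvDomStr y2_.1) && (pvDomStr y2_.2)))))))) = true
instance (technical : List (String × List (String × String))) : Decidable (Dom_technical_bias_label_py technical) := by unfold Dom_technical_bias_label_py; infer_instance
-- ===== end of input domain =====

-- B replaces A's six hardcoded per-key if/elif branches by one pass over the input's items,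
-- classifying each (key, signal) pair by membership in two pair tables; return value only.

-- shared helper: Python dict.get with first-match semantics on an association list
def pvAssocGet? {a : Type} (d : List (String × a)) (k : String) : Option a :=
  match d with
  | [] => none
  | (k', v) :: rest => if k' == k then some v else pvAssocGet? rest k

-- str(info.get("signal", ""))
def pvSig (info : List (String × String)) : String :=
  (pvAssocGet? info "signal").getD ""

-- str(technical.get(key, {}).get("signal", ""))
def pvSignal (technical : List (String × List (String × String))) (key : String) : String :=
  pvSig ((pvAssocGet? technical key).getD [])

-- ===== PORT A =====
def technical_bias_label_py (technical : List (String × List (String × String))) : String :=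
  let st := ["ma_system", "macd", "kdj", "obv"].foldl
    (fun (p : Int × Int) key =>
      let signal := pvSignal technical key
      if signal == "bullish" then (p.1 + 1, p.2)
      else if signal == "bearish" then (p.1, p.2 + 1)
      else p) (0, 0)
  let bull := st.1
  let bear := st.2
  let dmi_signal := pvSignal technical "dmi"
  let bull := if dmi_signal == "bullish_trend" then bull + 1 else bull
  let bear := if dmi_signal == "bullish_trend" then bear
              else if dmi_signal == "bearish_trend" then bear + 1 else bear
  let rsi_signal := pvSignal technical "rsi"
  let bull := if rsi_signal == "oversold" then bull + 1 else bull
  let bear := if rsi_signal == "oversold" then bear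
              else if rsi_signal == "overbought" then bear + 1 else bear
  if bull - bear ≥ 2 then "偏强"
  else if bear - bull ≥ 2 then "偏弱"
  else "分歧"

-- ===== PORT B =====
def pvBullPairs : List (String × String) :=
  [("ma_system", "bullish"), ("macd", "bullish"), ("kdj", "bullish"),
   ("obv", "bullish"), ("dmi", "bullish_trend"), ("rsi", "oversold")]

def pvBearPairs : List (String × String) :=
  [("ma_system", "bearish"), ("macd", "bearish"), ("kdj", "bearish"),
   ("obv", "bearish"), ("dmi", "bearish_trend"), ("rsi", "overbought")]

def technical_bias_label_py_alt (technical : List (String × List (String × String))) : String :=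
  let pairs := technical.map (fun kv => (kv.1, pvSig kv.2))
  let bull := pairs.countP (fun p => pvBullPairs.contains p)
  let bear := pairs.countP (fun p => pvBearPairs.contains p)
  let diff : Int := (bull : Int) - (bear : Int)
  if diff ≥ 2 then "偏强"
  else if diff ≤ -2 then "偏弱"
  else "分歧"

-- ===== PRECONDITION & SPEC =====
-- Pre_ excludes association lists with duplicate top-level keys, which cannot arise from a
-- Python dict: there A's first-match .get and B's scan over all items could disagree.
def Pre_technical_bias_label_py (technical : List (String × List (String × String))) : Prop :=
  (technical.map Prod.fst).Nodup
instance (technical : List (String × List (String × String))) : Decidable (Pre_technical_bias_label_py technical) := by unfold Pre_technical_bias_label_py; infer_instance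

def pvWitness_technical_bias_label_py : (List (String × List (String × String))) :=
  [("macd", [("signal", "bullish")]), ("rsi", [("signal", "oversold")])]

def Spec_technical_bias_label_py (technical : List (String × List (String × String))) (out : String) : Prop := out = technical_bias_label_py_alt technical
instance (technical : List (String × List (String × String))) (out : String) : Decidable (Spec_technical_bias_label_py technical out) := by unfold Spec_technical_bias_label_py; infer_instance

-- ===== CLAIM (what is proved, stated in full; the proofs are below) =====
def Claim_equal_technical_bias_label_py : Prop := ∀ (technical : List (String × List (String × String))), Dom_technical_bias_label_py technical → Pre_technical_bias_label_py technical → Spec_technical_bias_label_py technical (technical_bias_label_py technical)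

-- ===== LEMMAS AND PROOFS =====

theorem pvAssocGet?_none_of_not_mem {a : Type} (d : List (String × a)) (k : String)
    (h : k ∉ d.map Prod.fst) : pvAssocGet? d k = none := by
  induction d with
  | nil => rfl
  | cons e rest ih =>
    simp only [List.map_cons, List.mem_cons] at h
    push Not at h
    simp only [pvAssocGet?]
    rw [if_neg (by simp only [beq_iff_eq]; exact fun hh => h.1 hh.symm), ih h.2]

-- Adding a fresh key (k, info) in front of `rest` shifts the per-table count by exactly the
-- indicator of (k, s) being in the table, provided the table's keys are distinct and its
-- keywords are nonempty.
theorem countP_table_cons (table : List (String × String)) (k s : String)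
    (rest : List (String × List (String × String)))
    (hnd : (table.map Prod.fst).Nodup) (hkw : ∀ e ∈ table, e.2 ≠ "")
    (hk : pvAssocGet? rest k = none) :
    table.countP (fun e => (if k == e.1 then s else pvSignal rest e.1) == e.2)
      = table.countP (fun e => pvSignal rest e.1 == e.2)
        + (if table.contains (k, s) then 1 else 0) := by
  induction table with
  | nil => simp
  | cons e0 tbl ih =>
    simp only [List.map_cons, List.nodup_cons] at hnd
    have hkw0 : e0.2 ≠ "" := hkw e0 (by simp)
    have hkwt : ∀ e ∈ tbl, e.2 ≠ "" := fun e he => hkw e (by simp [he])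
    by_cases hke : k = e0.1
    · have htbl : tbl.contains (k, s) = false := by
        rw [Bool.eq_false_iff]
        intro hc
        have hm : (k, s) ∈ tbl := by simpa using hc
        exact hnd.1 (hke ▸ List.mem_map_of_mem hm)
      have hsigrest : (pvSignal rest e0.1 == e0.2) = false := by
        rw [← hke]
        simp [pvSignal, hk, pvSig, pvAssocGet?, Ne.symm hkw0]
      have hcong : tbl.countP (fun e => (if k == e.1 then s else pvSignal rest e.1) == e.2)
          = tbl.countP (fun e => pvSignal rest e.1 == e.2) := by
        apply List.countP_congr
        intro e he
        have hne : k ≠ e.1 := fun h => hnd.1 ((h ▸ hke ▸ rfl : e.1 = e0.1) ▸ List.mem_map_of_mem he)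
        simp [beq_iff_eq, hne]
      have hpair : ((k, s) == e0) = (s == e0.2) := by
        cases e0 with
        | mk k0 w0 => simp [Prod.ext_iff, hke]
      simp only [List.countP_cons, hcong, List.contains_cons, hpair, htbl,
        Bool.or_false, hsigrest, if_pos (show (k == e0.1) = true by simp [hke])]
      cases hs : (s == e0.2) <;> simp
    · have hpair : ((k, s) == e0) = false := by
        cases e0 with
        | mk k0 w0 => simp [Prod.ext_iff, hke]
      simp only [List.countP_cons, List.contains_cons, hpair, Bool.false_or,
        if_neg (show ¬ (k == e0.1) = true by simp [hke])]
      rw [ih hnd.2 hkwt]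
      omega

-- main bridge: with distinct input keys, counting table-pair hits over the input's items equals
-- counting, over the table, the keys whose looked-up signal matches the keyword.
theorem count_pairs_eq (table : List (String × String))
    (hnd : (table.map Prod.fst).Nodup) (hkw : ∀ e ∈ table, e.2 ≠ "") :
    ∀ (technical : List (String × List (String × String))),
      (technical.map Prod.fst).Nodup →
      (technical.map (fun kv => (kv.1, pvSig kv.2))).countP (fun p => table.contains p)
        = table.countP (fun e => pvSignal technical e.1 == e.2) := by
  intro technical
  induction technical with
  | nil =>
    intro _
    simp only [List.map_nil, List.countP_nil]
    symm
    rw [List.countP_eq_zero]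
    intro e he
    simp [pvSignal, pvAssocGet?, pvSig, Ne.symm (hkw e he)]
  | cons kv rest ih =>
    intro hnodup
    simp only [List.map_cons, List.nodup_cons] at hnodup
    have hk : pvAssocGet? rest kv.1 = none := pvAssocGet?_none_of_not_mem rest kv.1 hnodup.1
    have hsig : ∀ e : String × String,
        pvSignal (kv :: rest) e.1 = (if kv.1 == e.1 then pvSig kv.2 else pvSignal rest e.1) := by
      intro e
      simp only [pvSignal, pvAssocGet?]
      by_cases h : kv.1 = e.1 <;> simp [h]
    have hcong : table.countP (fun e => pvSignal (kv :: rest) e.1 == e.2)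
        = table.countP (fun e => (if kv.1 == e.1 then pvSig kv.2 else pvSignal rest e.1) == e.2) := by
      apply List.countP_congr
      intro e _
      rw [hsig e]
    rw [List.map_cons, List.countP_cons, hcong,
      countP_table_cons table kv.1 (pvSig kv.2) rest hnd hkw hk, ih hnodup.2]

-- a string cannot equal two distinct keywords at once
theorem beq_two_false (s a b : String) (h : a ≠ b) : ((s == a) && (s == b)) = false := by
  by_cases hs : s = a
  · subst hs; simp [h]
  · simp [hs]

-- A's branch structure vs B's two counts, abstracted to the twelve boolean tests; the side
-- conditions say a signal cannot match both the bullish and the bearish keyword of a key.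
theorem tbl_core : ∀ (b1 c1 b2 c2 b3 c3 b4 c4 b5 c5 b6 c6 : Bool),
    (b1 && c1) = false → (b2 && c2) = false → (b3 && c3) = false →
    (b4 && c4) = false → (b5 && c5) = false → (b6 && c6) = false →
    (let p1 : Int × Int := if b1 then ((0:Int) + 1, (0:Int)) else if c1 then ((0:Int), (0:Int) + 1) else ((0:Int), (0:Int))
     let p2 : Int × Int := if b2 then (p1.1 + 1, p1.2) else if c2 then (p1.1, p1.2 + 1) else p1
     let p3 : Int × Int := if b3 then (p2.1 + 1, p2.2) else if c3 then (p2.1, p2.2 + 1) else p2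
     let p4 : Int × Int := if b4 then (p3.1 + 1, p3.2) else if c4 then (p3.1, p3.2 + 1) else p3
     let bull := if b5 then p4.1 + 1 else p4.1
     let bear := if b5 then p4.2 else if c5 then p4.2 + 1 else p4.2
     let bull2 := if b6 then bull + 1 else bull
     let bear2 := if b6 then bear else if c6 then bear + 1 else bear
     if bull2 - bear2 ≥ 2 then "偏强" else if bear2 - bull2 ≥ 2 then "偏弱" else "分歧") =
    (let nb : Nat := 0 + (if b6 then 1 else 0) + (if b5 then 1 else 0) + (if b4 then 1 else 0)
                       + (if b3 then 1 else 0) + (if b2 then 1 else 0) + (if b1 then 1 else 0)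
     let nc : Nat := 0 + (if c6 then 1 else 0) + (if c5 then 1 else 0) + (if c4 then 1 else 0)
                       + (if c3 then 1 else 0) + (if c2 then 1 else 0) + (if c1 then 1 else 0)
     let diff : Int := (nb : Int) - (nc : Int)
     if diff ≥ 2 then "偏强" else if diff ≤ -2 then "偏弱" else "分歧") := by
  decide

-- ===== VERDICT (by name: the statement is the Claim_ definition above) =====
theorem technical_bias_label_py_spec : Claim_equal_technical_bias_label_py := by
  intro technical _ hpre
  unfold Spec_technical_bias_label_py technical_bias_label_py technical_bias_label_py_alt
  simp only [count_pairs_eq pvBullPairs (by decide) (by decide) technical hpre,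
      count_pairs_eq pvBearPairs (by decide) (by decide) technical hpre]
  simp only [List.foldl, pvBullPairs, pvBearPairs, List.countP_cons, List.countP_nil]
  exact tbl_core
    (pvSignal technical "ma_system" == "bullish") (pvSignal technical "ma_system" == "bearish")
    (pvSignal technical "macd" == "bullish") (pvSignal technical "macd" == "bearish")
    (pvSignal technical "kdj" == "bullish") (pvSignal technical "kdj" == "bearish")
    (pvSignal technical "obv" == "bullish") (pvSignal technical "obv" == "bearish")
    (pvSignal technical "dmi" == "bullish_trend") (pvSignal technical "dmi" == "bearish_trend")
    (pvSignal technical "rsi" == "oversold") (pvSignal technical "rsi" == "overbought")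
    (beq_two_false _ _ _ (by decide)) (beq_two_false _ _ _ (by decide))
    (beq_two_false _ _ _ (by decide)) (beq_two_false _ _ _ (by decide))
    (beq_two_false _ _ _ (by decide)) (beq_two_false _ _ _ (by decide))
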